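-- pv_equiv track=rewrite | github.com/changty/senti | apps/agent/src/senti/gateway/formatters.py | _convert_tables
-- ===== SOURCE A (Python) =====
-- def _convert_tables(text: str) -> str:
--     """Convert markdown tables to readable key-value lists.
--
--     Telegram doesn't support HTML tables, so we convert them to bold-label
--     lists that render cleanly in chat.
--     """
--     lines = text.split("\n")
--     result: list[str] = []
--     table_lines: list[str] = []
--
--     def _flush_table() -> None:
--         if not table_lines:
--             return
--         # Parse cells: strip outer pipes and split by inner pipes
--         rows = [
--             [c.strip() for c in line.strip().strip("|").split("|")]
--             for line in table_lines
--         ]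
--         # Need at least a header + separator + one data row
--         if len(rows) < 3:
--             result.extend(table_lines)
--             return
--         headers = rows[0]
--         # Skip separator row (row[1]) — contains dashes like "---"
--         data_rows = [r for r in rows[2:] if any(c.strip() for c in r)]
--         if not headers or not data_rows:
--             result.extend(table_lines)
--             return
--         for row in data_rows:
--             if len(headers) == 2:
--                 # Key-value pattern: <b>Key:</b> Value
--                 key = row[0] if len(row) > 0 else ""
--                 val = row[1] if len(row) > 1 else ""
--                 result.append(f"<b>{key}:</b> {val}")
--             else:
--                 # Multi-column: <b>H1:</b> v1, <b>H2:</b> v2, ...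
--                 parts = []
--                 for i, header in enumerate(headers):
--                     val = row[i] if i < len(row) else ""
--                     parts.append(f"<b>{header}:</b> {val}")
--                 result.append(", ".join(parts))
--
--     for line in lines:
--         stripped = line.strip()
--         if "|" in stripped and stripped.startswith("|"):
--             table_lines.append(line)
--         else:
--             _flush_table()
--             table_lines = []
--             result.append(line)
--
--     _flush_table()
--     return "\n".join(result)
-- ===== SOURCE B (Python) =====
-- def _is_table(line: str) -> bool:
--     # a stripped line starting with "|" necessarily contains "|"
--     return line.strip().startswith("|")
--
--
-- def _cells(line: str) -> list[str]:
--     return [c.strip() for c in line.strip().strip("|").split("|")]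
--
--
-- def _render(run: list[str]) -> list[str]:
--     """Render one maximal run of table lines; fall back to the raw lines."""
--     if len(run) < 3:
--         return run
--     headers = _cells(run[0])
--     # run[1] is the dash separator: never parsed; keep only non-blank data rows
--     data = [r for r in map(_cells, run[2:]) if any(r)]
--     if not data:
--         return run
--     if len(headers) == 2:
--         return ["<b>%s:</b> %s" % tuple((r + ["", ""])[:2]) for r in data]
--     pad = [""] * len(headers)
--     return [
--         ", ".join("<b>%s:</b> %s" % p for p in zip(headers, r + pad))
--         for r in data
--     ]
--
--
-- def _convert_tables(text: str) -> str:
--     lines = text.split("\n")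
--     out: list[str] = []
--     i, n = 0, len(lines)
--     while i < n:
--         t = _is_table(lines[i])
--         j = i + 1
--         while j < n and _is_table(lines[j]) == t:
--             j += 1
--         seg = lines[i:j]
--         out += _render(seg) if t else seg
--         i = j
--     return "\n".join(out)
-- ===== Notes on version B (the rewrite author's own statement) =====
-- stated objective: alternative
-- what changed: Replaced A's accumulator-plus-flush single pass (mutable table_lines buffer, nested closure mutating result) by a two-pointer index scan that slices out each maximal same-status segment, and replaced A's eager parse-everything flush (full rows matrix incl. separator, dead empty-header guard, per-row header-count branch with guarded indexing) by a lazy renderer that parses only the header and kept data lines, drops the unreachable empty-header check, decides the 2-column case once, and formats via zip against a padded row.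
import Mathlib
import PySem

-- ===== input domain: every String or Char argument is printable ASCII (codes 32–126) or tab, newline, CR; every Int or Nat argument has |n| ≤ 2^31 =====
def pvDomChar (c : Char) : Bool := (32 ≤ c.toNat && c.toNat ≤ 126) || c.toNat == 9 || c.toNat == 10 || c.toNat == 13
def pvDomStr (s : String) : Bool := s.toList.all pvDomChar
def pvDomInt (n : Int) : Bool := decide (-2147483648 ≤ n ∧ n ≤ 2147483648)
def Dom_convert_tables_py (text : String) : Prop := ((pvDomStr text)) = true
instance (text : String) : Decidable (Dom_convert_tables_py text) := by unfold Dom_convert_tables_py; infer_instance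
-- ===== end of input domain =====

-- B replaces A's accumulator-plus-flush single pass (mutable buffer, nested flushing closure)
-- by a two-pointer segment scan slicing out each maximal run, with a lazy renderer that parses
-- only the header and data lines (never the separator row); alternative decomposition, same cost.

-- ===== PORT A =====
-- A's nested _flush_table, as a pure function returning the lines it would append to result.
-- (str.split with a non-empty literal separator never raises: split? is some there, .getD [] is exact.)
def pvFmtRowA (headers row : List String) : String :=
  if headers.length == 2 then
    let key := if 0 < row.length then row.getD 0 "" else ""
    let val := if 1 < row.length then row.getD 1 "" else ""
    PySem.Str.join "" ["<b>", key, ":</b> ", val]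
  else
    let parts := (PySem.List.enumerate headers).foldl
      (fun acc p => acc ++ [PySem.Str.join "" ["<b>", p.2, ":</b> ",
        if p.1 < PySem.List.len row then PySem.List.pyGetD row p.1 "" else ""]]) []
    PySem.Str.join ", " parts

def pvFlushA (tableLines : List String) : List String :=
  if tableLines = [] then []
  else
    let rows := tableLines.map (fun line =>
      ((PySem.Str.split? (PySem.Str.stripChars (PySem.Str.strip line) "|") "|").getD []).map PySem.Str.strip)
    if rows.length < 3 then tableLines
    else
      let headers := rows.getD 0 []
      let dataRows := (PySem.List.slice rows (some 2) none).filter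
        (fun r => r.any (fun c => !(PySem.Str.strip c == "")))
      if headers == [] || dataRows == [] then tableLines
      else dataRows.foldl (fun acc row => acc ++ [pvFmtRowA headers row]) []

def convert_tables_py (text : String) : String :=
  let lines := (PySem.Str.split? text "\n").getD []
  let st := lines.foldl (fun (st : List String × List String) line =>
    let stripped := PySem.Str.strip line
    if PySem.Str.isIn "|" stripped && PySem.Str.startswith stripped "|" then
      (st.1, st.2 ++ [line])
    else
      (st.1 ++ pvFlushA st.2 ++ [line], [])) ([], [])
  PySem.Str.join "\n" (st.1 ++ pvFlushA st.2)

-- ===== PORT B =====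
def pvTblB (line : String) : Bool :=
  PySem.Str.startswith (PySem.Str.strip line) "|"

def pvCellsB (line : String) : List String :=
  ((PySem.Str.split? (PySem.Str.stripChars (PySem.Str.strip line) "|") "|").getD []).map PySem.Str.strip

def pvRenderB (run : List String) : List String :=
  if run.length < 3 then run
  else
    let headers := pvCellsB (run.getD 0 "")
    let data := ((run.drop 2).map pvCellsB).filter (fun r => r.any (fun c => !(c == "")))
    if data = [] then run
    else if headers.length == 2 then
      data.map (fun r =>
        let p := (r ++ ["", ""]).take 2
        PySem.Str.join "" ["<b>", p.getD 0 "", ":</b> ", p.getD 1 ""])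
    else
      let pad := List.replicate headers.length ""
      data.map (fun r => PySem.Str.join ", "
        ((headers.zip (r ++ pad)).map (fun p => PySem.Str.join "" ["<b>", p.1, ":</b> ", p.2])))

-- the two-pointer scan: peel off the maximal segment sharing the first line's table-status
def pvGoB : List String → List String
  | [] => []
  | l :: rest =>
    let t := pvTblB l
    let seg := l :: rest.takeWhile (fun x => pvTblB x == t)
    (if t then pvRenderB seg else seg) ++ pvGoB (rest.dropWhile (fun x => pvTblB x == t))
termination_by xs => xs.length
decreasing_by
  have := List.length_dropWhile_le (fun x => pvTblB x == pvTblB l) rest; simp; omega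

def convert_tables_py_alt (text : String) : String :=
  PySem.Str.join "\n" (pvGoB ((PySem.Str.split? text "\n").getD []))

-- ===== PRECONDITION & SPEC =====
def Spec_convert_tables_py (text : String) (out : String) : Prop := out = convert_tables_py_alt text
instance (text : String) (out : String) : Decidable (Spec_convert_tables_py text out) := by unfold Spec_convert_tables_py; infer_instance

-- ===== CLAIM (what is proved, stated in full; the proofs are below) =====
def Claim_equal_convert_tables_py : Prop := ∀ (text : String), Dom_convert_tables_py text → Spec_convert_tables_py text (convert_tables_py text)

-- ===== LEMMAS AND PROOFS =====

-- Python str.strip is idempotent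
lemma pvLstripStrip (t : List Char) : PySem.Chars.lstrip (PySem.Chars.strip t) = PySem.Chars.strip t := by
  unfold PySem.Chars.strip PySem.Chars.rstrip PySem.Chars.lstrip
  apply List.dropWhile_eq_self_iff.mpr
  intro hlen
  have hne : (List.dropWhile PySem.Chars.isspace (List.dropWhile PySem.Chars.isspace t).reverse).reverse ≠ [] :=
    List.ne_nil_of_length_pos hlen
  have hpre : (List.dropWhile PySem.Chars.isspace (List.dropWhile PySem.Chars.isspace t).reverse).reverse <+: (List.dropWhile PySem.Chars.isspace t) := by
    have := List.dropWhile_suffix (l := (List.dropWhile PySem.Chars.isspace t).reverse) (p := PySem.Chars.isspace)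
    exact List.reverse_suffix.mp (by simpa using this)
  obtain ⟨u, hu⟩ := hpre
  have hq := List.head?_append_of_ne_nil
    (l₁ := (List.dropWhile PySem.Chars.isspace (List.dropWhile PySem.Chars.isspace t).reverse).reverse) (l₂ := u) hne
  rw [hu, List.head?_eq_some_head hne, List.head_eq_getElem] at hq
  have h2 := List.head?_dropWhile_not PySem.Chars.isspace t
  rw [hq] at h2
  simpa using h2

lemma pvRstripIdem (t : List Char) : PySem.Chars.rstrip (PySem.Chars.rstrip t) = PySem.Chars.rstrip t := by
  unfold PySem.Chars.rstrip
  rw [List.reverse_reverse, List.dropWhile_idempotent]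

lemma pvStripIdem (s : String) : PySem.Str.strip (PySem.Str.strip s) = PySem.Str.strip s := by
  simp only [PySem.Str.strip]
  have : PySem.Chars.strip (PySem.Chars.strip s.toList) = PySem.Chars.strip s.toList := by
    calc PySem.Chars.rstrip (PySem.Chars.lstrip (PySem.Chars.strip s.toList))
        = PySem.Chars.rstrip (PySem.Chars.strip s.toList) := by rw [pvLstripStrip]
      _ = PySem.Chars.strip s.toList := by rw [PySem.Chars.strip, pvRstripIdem]
  simp [this]

-- str.split with a non-empty separator never returns the empty list
lemma pvSplitGoNeNil (sep : List Char) : ∀ fuel l cur acc, PySem.Chars.splitOn.go sep fuel l cur acc ≠ [] := by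
  intro fuel
  induction fuel with
  | zero => intro l cur acc; simp [PySem.Chars.splitOn.go]
  | succ n ih =>
    intro l cur acc
    match l with
    | [] => simp [PySem.Chars.splitOn.go]
    | c :: rest =>
      rw [PySem.Chars.splitOn.go]
      split
      · exact ih _ _ _
      · exact ih _ _ _

lemma pvCellsB_ne_nil (line : String) : pvCellsB line ≠ [] := by
  unfold pvCellsB
  simp only [PySem.Str.split?, PySem.Chars.split?]
  intro h
  simp [PySem.Chars.splitOn] at h
  exact pvSplitGoNeNil _ _ _ [] [] h

-- the table-line predicates agree: a stripped line starting with "|" contains "|"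
lemma pvTbl_eq (line : String) :
    (PySem.Str.isIn "|" (PySem.Str.strip line) && PySem.Str.startswith (PySem.Str.strip line) "|") = pvTblB line := by
  unfold pvTblB
  cases hb : PySem.Str.startswith (PySem.Str.strip line) "|" with
  | false => rw [Bool.and_false]
  | true =>
    have hb' : PySem.Chars.startswith (PySem.Chars.strip line.toList) ['|'] = true := by
      simpa using hb
    have hin : PySem.Chars.isIn ['|'] (PySem.Chars.strip line.toList) = true :=
      (PySem.Chars.isIn_iff_infix _ _).mpr (((PySem.Chars.startswith_iff _ _).mp hb').isInfix)
    simp [hin]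

-- per-row formatting agreement (2-column case)
lemma pvFmt2_eq (row : List String) :
    ((if 0 < row.length then row.getD 0 "" else ""),
     (if 1 < row.length then row.getD 1 "" else "")) =
    (((row ++ ["", ""]).take 2).getD 0 "", ((row ++ ["", ""]).take 2).getD 1 "") := by
  match row with
  | [] => rfl
  | [a] => rfl
  | a :: b :: t => simp

-- per-row formatting agreement (multi-column case)
lemma pvFmtMulti_eq (hs row : List String) :
    (PySem.List.enumerate hs).map (fun p =>
      PySem.Str.join "" ["<b>", p.2, ":</b> ",
        if p.1 < PySem.List.len row then PySem.List.pyGetD row p.1 "" else ""]) =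
    (hs.zip (row ++ List.replicate hs.length "")).map
      (fun p => PySem.Str.join "" ["<b>", p.1, ":</b> ", p.2]) := by
  apply List.ext_getElem
  · simp [PySem.List.length_enumerate]
  · intro k h1 h2
    simp only [List.getElem_map, PySem.List.getElem_enumerate, List.getElem_zip]
    have hk : k < hs.length := by simpa [PySem.List.length_enumerate] using h1
    by_cases hr : k < row.length
    · have hc : ((0 : Int) + k) < PySem.List.len row := by
        simp [PySem.List.len_eq]; exact_mod_cast hr
      rw [if_pos hc]
      have hg : PySem.List.pyGetD row ((0 : Int) + k) "" = row[k] := by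
        simpa using PySem.List.pyGetD_ofNat (xs := row) (n := k) (d := "") hr
      rw [hg, List.getElem_append_left hr]
    · have hc : ¬ ((0 : Int) + k) < PySem.List.len row := by
        simp [PySem.List.len_eq]; omega
      rw [if_neg hc]
      rw [List.getElem_append_right (by omega)]
      simp

lemma pvFmtRowA_eq2 (headers row : List String) (h2 : headers.length == 2) :
    pvFmtRowA headers row =
      (let p := (row ++ ["", ""]).take 2
       PySem.Str.join "" ["<b>", p.getD 0 "", ":</b> ", p.getD 1 ""]) := by
  unfold pvFmtRowA
  rw [if_pos h2]
  have h := pvFmt2_eq row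
  simp only [Prod.mk.injEq] at h
  simp only [h.1, h.2]

lemma pvFmtRowA_eqM (headers row : List String) (h2 : ¬ headers.length == 2) :
    pvFmtRowA headers row =
      PySem.Str.join ", " ((headers.zip (row ++ List.replicate headers.length "")).map
        (fun p => PySem.Str.join "" ["<b>", p.1, ":</b> ", p.2])) := by
  unfold pvFmtRowA
  rw [if_neg h2]
  rw [PySem.List.foldl_append_singleton_eq_map]
  simp only [List.nil_append]
  exact congrArg (PySem.Str.join ", ") (pvFmtMulti_eq headers row)

-- A's flush of a run equals B's lazy renderer, on every list of lines
lemma pvFlushA_eq_render (run : List String) : pvFlushA run = pvRenderB run := by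
  rcases run with _ | ⟨l, rs⟩
  · rfl
  · simp only [pvFlushA, pvRenderB, if_neg (List.cons_ne_nil l rs)]
    simp only [PySem.List.slice_from _ (show (0:Int) ≤ 2 by norm_num), show ((2:Int).toNat) = 2 from rfl]
    rw [List.length_map]
    by_cases h3 : (l :: rs).length < 3
    · rw [if_pos h3, if_pos h3]
    · rw [if_neg h3, if_neg h3]
      have hhd : ((l :: rs).map (fun line =>
          ((PySem.Str.split? (PySem.Str.stripChars (PySem.Str.strip line) "|") "|").getD []).map PySem.Str.strip)).getD 0 []
          = pvCellsB ((l :: rs).getD 0 "") := by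
        rw [List.map_cons, List.getD_cons_zero, List.getD_cons_zero, pvCellsB]
      have hdata : (((l :: rs).map (fun line =>
            ((PySem.Str.split? (PySem.Str.stripChars (PySem.Str.strip line) "|") "|").getD []).map PySem.Str.strip)).drop 2).filter
            (fun r => r.any (fun c => !(PySem.Str.strip c == "")))
          = (((l :: rs).drop 2).map pvCellsB).filter (fun r => r.any (fun c => !(c == ""))) := by
        rw [← List.map_drop]
        apply List.filter_congr
        intro r hr
        obtain ⟨line, _, hline⟩ := List.mem_map.mp hr
        subst hline
        simp only [List.any_map]
        exact List.any_congr rfl (fun a => by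
          rw [Function.comp_apply, Function.comp_apply, pvStripIdem])
      rw [hhd, hdata]
      by_cases hd : (((l :: rs).drop 2).map pvCellsB).filter (fun r => r.any (fun c => !(c == ""))) = []
      · rw [hd]
        rw [if_pos rfl]
        rw [if_pos (by simp)]
      · rw [if_neg hd]
        have hcond : (pvCellsB ((l :: rs).getD 0 "") == [] ||
            (((l :: rs).drop 2).map pvCellsB).filter (fun r => r.any (fun c => !(c == ""))) == []) = false := by
          simp only [Bool.or_eq_false_iff, beq_eq_false_iff_ne]
          exact ⟨pvCellsB_ne_nil _, hd⟩
        rw [hcond]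
        simp only [Bool.false_eq_true, if_false]
        rw [PySem.List.foldl_append_singleton_eq_map, List.nil_append]
        by_cases h2 : (pvCellsB ((l :: rs).getD 0 "")).length == 2
        · rw [if_pos h2]
          exact List.map_congr_left (fun row _ => pvFmtRowA_eq2 _ row h2)
        · rw [if_neg h2]
          exact List.map_congr_left (fun row _ => pvFmtRowA_eqM _ row h2)

-- A's loop, written as "output contributed from pending table_lines tl onward".
def pvF : List String → List String → List String
  | [], tl => pvFlushA tl
  | l :: rest, tl =>
    if pvTblB l then pvF rest (tl ++ [l]) else pvFlushA tl ++ [l] ++ pvF rest []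

-- what follows a completed table run
def pvTail : List String → List String
  | [] => []
  | l :: rest => l :: pvF rest []

lemma pvF_nil (tl : List String) : pvF [] tl = pvFlushA tl := rfl

lemma pvF_cons (l : String) (rest tl : List String) :
    pvF (l :: rest) tl =
      if pvTblB l then pvF rest (tl ++ [l]) else pvFlushA tl ++ [l] ++ pvF rest [] := rfl

lemma pvFlushA_nil : pvFlushA [] = [] := rfl

-- A's foldl, with pending table lines tl and already-emitted acc, produces acc ++ pvF lines tl
lemma pvFoldl_eq (lines : List String) : ∀ (acc tl : List String),
    (lines.foldl (fun (st : List String × List String) line =>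
      let stripped := PySem.Str.strip line
      if PySem.Str.isIn "|" stripped && PySem.Str.startswith stripped "|" then
        (st.1, st.2 ++ [line])
      else
        (st.1 ++ pvFlushA st.2 ++ [line], [])) (acc, tl)).1 ++
    pvFlushA ((lines.foldl (fun (st : List String × List String) line =>
      let stripped := PySem.Str.strip line
      if PySem.Str.isIn "|" stripped && PySem.Str.startswith stripped "|" then
        (st.1, st.2 ++ [line])
      else
        (st.1 ++ pvFlushA st.2 ++ [line], [])) (acc, tl)).2) = acc ++ pvF lines tl := by
  induction lines with
  | nil => intro acc tl; rfl
  | cons l rest ih =>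
    intro acc tl
    simp only [List.foldl_cons]
    by_cases hk : pvTblB l
    · have hk' : (PySem.Str.isIn "|" (PySem.Str.strip l) &&
          PySem.Str.startswith (PySem.Str.strip l) "|") = true := by rw [pvTbl_eq]; exact hk
      simp only [hk', if_true]
      rw [ih acc (tl ++ [l]), pvF_cons, if_pos hk]
    · have hk' : (PySem.Str.isIn "|" (PySem.Str.strip l) &&
          PySem.Str.startswith (PySem.Str.strip l) "|") = false := by
        rw [pvTbl_eq]; simpa using hk
      simp only [hk', Bool.false_eq_true, if_false]
      rw [ih (acc ++ pvFlushA tl ++ [l]) [], pvF_cons, if_neg hk]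
      simp

-- pushing a table run through pvF
lemma pvF_run (rest : List String) : ∀ tl : List String,
    pvF rest tl = pvFlushA (tl ++ rest.takeWhile pvTblB) ++ pvTail (rest.dropWhile pvTblB) := by
  induction rest with
  | nil => intro tl; simp [pvF_nil, pvTail]
  | cons r rs ih =>
    intro tl
    by_cases hk : pvTblB r
    · rw [List.takeWhile_cons_of_pos hk, List.dropWhile_cons_of_pos hk]
      rw [pvF_cons, if_pos hk, ih (tl ++ [r])]
      simp
    · rw [List.takeWhile_cons_of_neg hk, List.dropWhile_cons_of_neg hk]
      rw [pvF_cons, if_neg hk]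
      simp [pvTail]

-- pvGoB unfolded on a table head / non-table head
lemma pvGoB_cons_true (l : String) (rest : List String) (h : pvTblB l = true) :
    pvGoB (l :: rest) = pvRenderB (l :: rest.takeWhile pvTblB) ++ pvGoB (rest.dropWhile pvTblB) := by
  rw [pvGoB]
  simp only [h, if_true]
  have hf : (fun x => pvTblB x == true) = pvTblB := by funext x; simp
  rw [hf]

lemma pvGoB_cons_false (l : String) (rest : List String) (h : pvTblB l = false) :
    pvGoB (l :: rest) = (l :: rest.takeWhile (fun x => !pvTblB x)) ++ pvGoB (rest.dropWhile (fun x => !pvTblB x)) := by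
  rw [pvGoB]
  simp only [h, Bool.false_eq_true, if_false]
  have hf : (fun x => pvTblB x == false) = (fun x => !pvTblB x) := by funext x; simp
  rw [hf]

-- B's scan passes a run of non-table lines through unchanged, element by element
lemma pvGoB_nontable (rest : List String) :
    pvGoB rest = rest.takeWhile (fun x => !pvTblB x) ++
      pvGoB (rest.dropWhile (fun x => !pvTblB x)) := by
  match rest with
  | [] => simp
  | r :: rs =>
    by_cases hk : pvTblB r
    · rw [List.takeWhile_cons_of_neg (by simp [hk]), List.dropWhile_cons_of_neg (by simp [hk])]
      simp
    · rw [List.takeWhile_cons_of_pos (by simp [hk]), List.dropWhile_cons_of_pos (by simp [hk])]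
      rw [pvGoB_cons_false r rs (by simpa using hk)]

lemma pvF_eq_go (n : Nat) : ∀ (lines : List String), lines.length ≤ n →
    pvF lines [] = pvGoB lines := by
  induction n with
  | zero =>
    intro lines h
    have hnil : lines = [] := List.eq_nil_of_length_eq_zero (by omega)
    subst hnil
    rw [pvF_nil, pvFlushA_nil, pvGoB]
  | succ n ih =>
    intro lines h
    match lines with
    | [] => rw [pvF_nil, pvFlushA_nil, pvGoB]
    | l :: rest =>
      simp only [List.length_cons] at h
      by_cases hk : pvTblB l
      · rw [pvF_cons, if_pos hk, List.nil_append, pvF_run rest [l]]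
        rw [pvGoB_cons_true l rest hk]
        rw [List.singleton_append, pvFlushA_eq_render]
        congr 1
        have hdrop := List.length_dropWhile_le pvTblB rest
        rcases hEq : rest.dropWhile pvTblB with _ | ⟨l', r'⟩
        · rw [pvTail, pvGoB]
        · have h0 := List.head?_dropWhile_not pvTblB rest
          rw [hEq] at h0
          have hl' : pvTblB l' = false := by simpa using h0
          rw [hEq] at hdrop
          simp only [List.length_cons] at hdrop
          rw [pvTail]
          rw [ih r' (by omega)]
          rw [pvGoB_nontable r']
          rw [pvGoB_cons_false l' r' hl']
          simp
      · rw [pvF_cons, if_neg hk, pvFlushA_nil, List.nil_append]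
        rw [ih rest (by omega)]
        rw [pvGoB_nontable rest]
        rw [pvGoB_cons_false l rest (by simpa using hk)]
        simp

-- ===== VERDICT (by name: the statement is the Claim_ definition above) =====
theorem convert_tables_py_spec : Claim_equal_convert_tables_py := by
  intro text _
  show convert_tables_py text = convert_tables_py_alt text
  simp only [convert_tables_py, convert_tables_py_alt]
  congr 1
  have h := pvFoldl_eq ((PySem.Str.split? text "\n").getD []) [] []
  rw [List.nil_append] at h
  rw [h]
  exact pvF_eq_go ((PySem.Str.split? text "\n").getD []).length _ le_rfl
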